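-- pv_equiv track=rewrite | github.com/ChaseBlairChen/RAG-chatbot | legal_assistant/api/routers/external.py | _generate_search_tips
-- ===== SOURCE A (Python) =====
-- from typing import List, Optional
--
-- def _generate_search_tips(legal_issue: str) -> List[str]:
--     """Generate search tips for specific legal issues"""
--     tips = [
--         "Use specific legal terminology when available",
--         "Search both the controlling law and recent enforcement examples",
--         "Look for government agency guidance and interpretations",
--         "Check for recent case law interpreting the relevant statutes",
--         "Verify the current version of any law or regulation cited",
--         "Consider both federal and state requirements that may apply"
--     ]
--
--     # Issue-specific tips
--     issue_lower = legal_issue.lower()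
--
--     if any(term in issue_lower for term in ['environmental', 'epa', 'pollution']):
--         tips.extend([
--             "Search EPA enforcement database for practical compliance examples",
--             "Check both federal EPA requirements and state environmental laws",
--             "Look for recent enforcement actions in your industry/area"
--         ])
--
--     if any(term in issue_lower for term in ['immigration', 'visa', 'uscis']):
--         tips.extend([
--             "Check current USCIS processing times and policy updates",
--             "Verify priority dates in monthly visa bulletins",
--             "Look for recent circuit court decisions affecting your case type"
--         ])
--
--     if any(term in issue_lower for term in ['business', 'sec', 'corporate']):
--         tips.extend([
--             "Search SEC enforcement actions for compliance guidance",
--             "Check both federal securities law and state corporate law",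
--             "Look for recent SEC guidance and no-action letters"
--         ])
--
--     if any(term in issue_lower for term in ['labor', 'osha', 'workplace']):
--         tips.extend([
--             "Search OSHA citation database for workplace safety examples",
--             "Check both federal OSHA standards and state workplace laws",
--             "Look for industry-specific guidance and interpretations"
--         ])
--
--     return tips
-- ===== SOURCE B (Python) =====
-- from typing import List, Optional
--
-- _BASE_TIPS = [
--     "Use specific legal terminology when available",
--     "Search both the controlling law and recent enforcement examples",
--     "Look for government agency guidance and interpretations",
--     "Check for recent case law interpreting the relevant statutes",
--     "Verify the current version of any law or regulation cited",
--     "Consider both federal and state requirements that may apply",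
-- ]
--
-- _GROUPS = [
--     (('environmental', 'epa', 'pollution'), [
--         "Search EPA enforcement database for practical compliance examples",
--         "Check both federal EPA requirements and state environmental laws",
--         "Look for recent enforcement actions in your industry/area",
--     ]),
--     (('immigration', 'visa', 'uscis'), [
--         "Check current USCIS processing times and policy updates",
--         "Verify priority dates in monthly visa bulletins",
--         "Look for recent circuit court decisions affecting your case type",
--     ]),
--     (('business', 'sec', 'corporate'), [
--         "Search SEC enforcement actions for compliance guidance",
--         "Check both federal securities law and state corporate law",
--         "Look for recent SEC guidance and no-action letters",
--     ]),
--     (('labor', 'osha', 'workplace'), [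
--         "Search OSHA citation database for workplace safety examples",
--         "Check both federal OSHA standards and state workplace laws",
--         "Look for industry-specific guidance and interpretations",
--     ]),
-- ]
--
-- def _matched_groups(low: str) -> set:
--     """One scan over the text: naive multi-pattern matching that collects
--     the set of indices of groups whose keyword starts at some position."""
--     matched = set()
--     for i in range(len(low)):
--         for g, (keywords, _) in enumerate(_GROUPS):
--             if any(low.startswith(kw, i) for kw in keywords):
--                 matched.add(g)
--     return matched
--
-- def _generate_search_tips(legal_issue: str) -> List[str]:
--     """Generate search tips: scan the lowered issue text once collecting the
--     matched group set, then one pass emitting matched groups' tips in order."""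
--     low = legal_issue.lower()
--     matched = _matched_groups(low)
--     tips = list(_BASE_TIPS)
--     for g, (_, extra) in enumerate(_GROUPS):
--         if g in matched:
--             tips.extend(extra)
--     return tips
-- ===== Notes on version B (the rewrite author's own statement) =====
-- stated objective: alternative
-- what changed: Instead of four per-group substring tests, B makes one scan over the lowered text doing naive multi-pattern matching at each position to collect the set of matched group indices, then emits the base tips plus the matched groups' tips in one table pass.
import Mathlib
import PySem

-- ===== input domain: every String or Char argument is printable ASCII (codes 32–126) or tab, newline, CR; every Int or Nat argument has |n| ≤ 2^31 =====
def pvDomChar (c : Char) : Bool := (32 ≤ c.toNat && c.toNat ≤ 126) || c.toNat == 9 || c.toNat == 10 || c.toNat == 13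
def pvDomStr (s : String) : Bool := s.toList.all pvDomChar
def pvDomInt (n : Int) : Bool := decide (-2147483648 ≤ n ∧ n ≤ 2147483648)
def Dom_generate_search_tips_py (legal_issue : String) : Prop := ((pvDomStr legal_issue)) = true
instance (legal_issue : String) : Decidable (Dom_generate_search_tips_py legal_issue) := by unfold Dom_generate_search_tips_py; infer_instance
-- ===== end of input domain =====

-- B replaces A's four per-group substring tests with ONE scan over the lowered text
-- (naive multi-pattern matching collecting the set of matched groups), then one
-- pass emitting the matched groups' tips in order; objective: alternative.

-- ===== PORT A =====
-- literal transliteration: base list, issue_lower, four conditional extends in order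
def generate_search_tips_py (legal_issue : String) : List String :=
  let tips : List String := [
    "Use specific legal terminology when available",
    "Search both the controlling law and recent enforcement examples",
    "Look for government agency guidance and interpretations",
    "Check for recent case law interpreting the relevant statutes",
    "Verify the current version of any law or regulation cited",
    "Consider both federal and state requirements that may apply"]
  let issue_lower := PySem.Str.lower legal_issue
  let tips := if (["environmental", "epa", "pollution"].any (fun term => PySem.Str.isIn term issue_lower)) then
      tips ++ [
        "Search EPA enforcement database for practical compliance examples",
        "Check both federal EPA requirements and state environmental laws",
        "Look for recent enforcement actions in your industry/area"]
    else tips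
  let tips := if (["immigration", "visa", "uscis"].any (fun term => PySem.Str.isIn term issue_lower)) then
      tips ++ [
        "Check current USCIS processing times and policy updates",
        "Verify priority dates in monthly visa bulletins",
        "Look for recent circuit court decisions affecting your case type"]
    else tips
  let tips := if (["business", "sec", "corporate"].any (fun term => PySem.Str.isIn term issue_lower)) then
      tips ++ [
        "Search SEC enforcement actions for compliance guidance",
        "Check both federal securities law and state corporate law",
        "Look for recent SEC guidance and no-action letters"]
    else tips
  let tips := if (["labor", "osha", "workplace"].any (fun term => PySem.Str.isIn term issue_lower)) then
      tips ++ [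
        "Search OSHA citation database for workplace safety examples",
        "Check both federal OSHA standards and state workplace laws",
        "Look for industry-specific guidance and interpretations"]
    else tips
  tips

-- ===== PORT B =====
def pvBaseTips : List String := [
  "Use specific legal terminology when available",
  "Search both the controlling law and recent enforcement examples",
  "Look for government agency guidance and interpretations",
  "Check for recent case law interpreting the relevant statutes",
  "Verify the current version of any law or regulation cited",
  "Consider both federal and state requirements that may apply"]

def pvGroups : List (List (List Char) × List String) := [
  (["environmental".toList, "epa".toList, "pollution".toList], [
    "Search EPA enforcement database for practical compliance examples",
    "Check both federal EPA requirements and state environmental laws",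
    "Look for recent enforcement actions in your industry/area"]),
  (["immigration".toList, "visa".toList, "uscis".toList], [
    "Check current USCIS processing times and policy updates",
    "Verify priority dates in monthly visa bulletins",
    "Look for recent circuit court decisions affecting your case type"]),
  (["business".toList, "sec".toList, "corporate".toList], [
    "Search SEC enforcement actions for compliance guidance",
    "Check both federal securities law and state corporate law",
    "Look for recent SEC guidance and no-action letters"]),
  (["labor".toList, "osha".toList, "workplace".toList], [
    "Search OSHA citation database for workplace safety examples",
    "Check both federal OSHA standards and state workplace laws",
    "Look for industry-specific guidance and interpretations"])]

-- low.startswith(kw, i) is ported exactly as startswith on the drop-i suffix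
def pvMatchedGroups (low : List Char) : PySem.Set Int :=
  (List.range low.length).foldl
    (fun m i =>
      (PySem.List.enumerate pvGroups 0).foldl
        (fun m p =>
          if p.2.1.any (fun kw => PySem.Chars.startswith (low.drop i) kw) then
            PySem.Set.add m p.1
          else m)
        m)
    PySem.Set.empty

def generate_search_tips_py_alt (legal_issue : String) : List String :=
  let low := (PySem.Str.lower legal_issue).toList
  let matched := pvMatchedGroups low
  (PySem.List.enumerate pvGroups 0).foldl
    (fun tips p => if PySem.Set.contains matched p.1 then tips ++ p.2.2 else tips)
    pvBaseTips

-- ===== PRECONDITION & SPEC =====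
def Spec_generate_search_tips_py (legal_issue : String) (out : List String) : Prop := out = generate_search_tips_py_alt legal_issue
instance (legal_issue : String) (out : List String) : Decidable (Spec_generate_search_tips_py legal_issue out) := by unfold Spec_generate_search_tips_py; infer_instance

-- ===== CLAIM (what is proved, stated in full; the proofs are below) =====
def Claim_equal_generate_search_tips_py : Prop := ∀ (legal_issue : String), Dom_generate_search_tips_py legal_issue → Spec_generate_search_tips_py legal_issue (generate_search_tips_py legal_issue)

-- ===== LEMMAS AND PROOFS =====

-- membership after a fold that conditionally adds (f b) for each b of l
lemma mem_foldl_addIf {β : Type} (l : List β) (p : β → Bool) (f : β → Int)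
    (m : PySem.Set Int) (g : Int) :
    (g ∈ l.foldl (fun m b => if p b then PySem.Set.add m (f b) else m) m) ↔
      g ∈ m ∨ ∃ b ∈ l, p b = true ∧ f b = g := by
  induction l generalizing m with
  | nil => simp
  | cons x xs ih =>
    simp only [List.foldl_cons, ih]
    by_cases hp : p x = true
    · simp only [hp, if_true, PySem.Set.mem_add, List.exists_mem_cons_iff]
      tauto
    · simp only [hp, if_false, Bool.false_eq_true, List.exists_mem_cons_iff]
      tauto

-- membership after folding a step F whose membership is characterised by Q
lemma mem_foldl_comp {β : Type} (l : List β) (F : PySem.Set Int → β → PySem.Set Int)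
    (Q : β → Int → Prop) (h : ∀ m b g, g ∈ F m b ↔ g ∈ m ∨ Q b g)
    (m : PySem.Set Int) (g : Int) :
    g ∈ l.foldl F m ↔ g ∈ m ∨ ∃ b ∈ l, Q b g := by
  induction l generalizing m with
  | nil => simp
  | cons x xs ih =>
    simp only [List.foldl_cons, ih, h, List.exists_mem_cons_iff]
    tauto

-- a nonempty pattern occurs in s iff it is a prefix of some suffix s.drop i with i < len s
lemma exists_drop_startswith_iff (s kw : List Char) (hkw : kw ≠ []) :
    (∃ i < s.length, PySem.Chars.startswith (s.drop i) kw = true) ↔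
      PySem.Chars.isIn kw s = true := by
  rw [← PySem.Chars.exists_prefix_drop_iff_isIn]
  constructor
  · rintro ⟨i, _, hi⟩
    exact ⟨i, (PySem.Chars.startswith_iff _ _).1 hi⟩
  · rintro ⟨j, hj⟩
    by_cases hlen : j < s.length
    · exact ⟨j, hlen, (PySem.Chars.startswith_iff _ _).2 hj⟩
    · exfalso
      rw [List.drop_eq_nil_of_le (le_of_not_gt hlen)] at hj
      exact hkw (List.prefix_nil.mp hj)

-- every keyword of every group is nonempty
lemma pvGroups_kw_ne_nil : ∀ p ∈ PySem.List.enumerate pvGroups 0, ∀ kw ∈ p.2.1, kw ≠ [] := by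
  decide

-- the matched set of B contains g iff some keyword of group g occurs in low
lemma mem_matched_iff (low : List Char) (g : Int) :
    g ∈ pvMatchedGroups low ↔
    ∃ p ∈ PySem.List.enumerate pvGroups 0, p.1 = g ∧
      p.2.1.any (fun kw => PySem.Chars.isIn kw low) = true := by
  unfold pvMatchedGroups
  rw [mem_foldl_comp (Q := fun i g => ∃ p ∈ PySem.List.enumerate pvGroups 0,
        (p.2.1.any (fun kw => PySem.Chars.startswith (low.drop i) kw)) = true ∧ p.1 = g)
      (h := fun m i g => mem_foldl_addIf _ _ _ m g)]
  simp only [PySem.Set.empty, List.not_mem_nil, false_or, List.mem_range, List.any_eq_true]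
  constructor
  · rintro ⟨i, hi, p, hp, ⟨kw, hkw, hsw⟩, hg⟩
    refine ⟨p, hp, hg, kw, hkw, ?_⟩
    exact (exists_drop_startswith_iff low kw (pvGroups_kw_ne_nil p hp kw hkw)).1 ⟨i, hi, hsw⟩
  · rintro ⟨p, hp, hg, kw, hkw, hin⟩
    obtain ⟨i, hi, hsw⟩ :=
      (exists_drop_startswith_iff low kw (pvGroups_kw_ne_nil p hp kw hkw)).2 hin
    exact ⟨i, hi, p, hp, ⟨kw, hkw, hsw⟩, hg⟩

-- ===== VERDICT (by name: the statement is the Claim_ definition above) =====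
theorem generate_search_tips_py_spec : Claim_equal_generate_search_tips_py := by
  intro s _
  unfold Spec_generate_search_tips_py generate_search_tips_py generate_search_tips_py_alt
  have hcontains : ∀ g : Int, PySem.Set.contains (pvMatchedGroups (PySem.Str.lower s).toList) g =
      ((PySem.List.enumerate pvGroups 0).any
        (fun p => decide (p.1 = g) && p.2.1.any
          (fun kw => PySem.Chars.isIn kw (PySem.Str.lower s).toList))) := by
    intro g
    rw [Bool.eq_iff_iff, PySem.Set.contains_iff, mem_matched_iff]
    simp [List.any_eq_true]
    try tauto
  have e0 : PySem.Set.contains (pvMatchedGroups (PySem.Str.lower s).toList) 0 =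
      (["environmental", "epa", "pollution"].any (fun term => PySem.Str.isIn term (PySem.Str.lower s))) := by
    rw [hcontains]; simp [pvGroups, PySem.List.enumerate]
  have e1 : PySem.Set.contains (pvMatchedGroups (PySem.Str.lower s).toList) 1 =
      (["immigration", "visa", "uscis"].any (fun term => PySem.Str.isIn term (PySem.Str.lower s))) := by
    rw [hcontains]; simp [pvGroups, PySem.List.enumerate]
  have e2 : PySem.Set.contains (pvMatchedGroups (PySem.Str.lower s).toList) 2 =
      (["business", "sec", "corporate"].any (fun term => PySem.Str.isIn term (PySem.Str.lower s))) := by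
    rw [hcontains]; simp [pvGroups, PySem.List.enumerate]
  have e3 : PySem.Set.contains (pvMatchedGroups (PySem.Str.lower s).toList) 3 =
      (["labor", "osha", "workplace"].any (fun term => PySem.Str.isIn term (PySem.Str.lower s))) := by
    rw [hcontains]; simp [pvGroups, PySem.List.enumerate]
  rw [show PySem.List.enumerate pvGroups 0 = [
    ((0 : Int), (["environmental".toList, "epa".toList, "pollution".toList], [
      "Search EPA enforcement database for practical compliance examples",
      "Check both federal EPA requirements and state environmental laws",
      "Look for recent enforcement actions in your industry/area"])),
    ((1 : Int), (["immigration".toList, "visa".toList, "uscis".toList], [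
      "Check current USCIS processing times and policy updates",
      "Verify priority dates in monthly visa bulletins",
      "Look for recent circuit court decisions affecting your case type"])),
    ((2 : Int), (["business".toList, "sec".toList, "corporate".toList], [
      "Search SEC enforcement actions for compliance guidance",
      "Check both federal securities law and state corporate law",
      "Look for recent SEC guidance and no-action letters"])),
    ((3 : Int), (["labor".toList, "osha".toList, "workplace".toList], [
      "Search OSHA citation database for workplace safety examples",
      "Check both federal OSHA standards and state workplace laws",
      "Look for industry-specific guidance and interpretations"]))] from rfl]
  simp only [List.foldl_cons, List.foldl_nil]
  rw [e0, e1, e2, e3]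
  rfl
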